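-- pv_equiv track=rewrite | github.com/julianbrooke/LatticeFS | multi_helper.py | get_multi_id_range_one_word_skip
-- ===== SOURCE A (Python) =====
-- def get_multi_id_range_one_word_skip(POSes,sentence,start,midend,midstart,end,word_loc):
--
--     final = 0
--     for i in range(end -1, midstart -1,-1):
--         if POSes[i] == -2:
--             return 0
--         if i == word_loc:
--             final = final << 18 | sentence[i]
--         else:
--             final = final << 18 | POSes[i]
--
--     for i in range(midend -1, start -1,-1):
--         if POSes[i] == -2:
--             return 0
--         if i == word_loc:
--             final = final << 18 | sentence[i]
--         else:
--             final = final << 18 | POSes[i]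
--
--     final = final << 18 | midend - start - 1
--
--     return final
-- ===== SOURCE B (Python) =====
-- def _pack(vals):
--     # combine an LSB-first list of 18-bit fields by divide and conquer
--     n = len(vals)
--     if n == 1:
--         return vals[0]
--     m = n // 2
--     return (_pack(vals[m:]) << (18 * m)) | _pack(vals[:m])
--
-- def get_multi_id_range_one_word_skip(POSes, sentence, start, midend, midstart, end, word_loc):
--     # validation first
--     if any(POSes[i] == -2 for i in range(midstart, end)) or \
--        any(POSes[i] == -2 for i in range(start, midend)):
--         return 0
--     # materialise the fields LSB-first (ascending index order), then merge
--     # them by halving: shifts distribute over OR, so this equals A's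
--     # MSB-first shifting accumulator bit for bit
--     vals = [midend - start - 1]
--     vals += [sentence[i] if i == word_loc else POSes[i] for i in range(start, midend)]
--     vals += [sentence[i] if i == word_loc else POSes[i] for i in range(midstart, end)]
--     return _pack(vals)
-- ===== Notes on version B (the rewrite author's own statement) =====
-- stated objective: alternative
-- what changed: A packs MSB-first by walking both index ranges downwards and shifting the whole accumulator at every step with the -2 check interleaved; B validates first, materialises the fields LSB-first in ascending order and merges them by divide-and-conquer (_pack), shifting each half-result once — correct because left shift distributes over OR.
-- outside the precondition, e.g. on get_multi_id_range_one_word_skip([-2], [], 0, 0, -3, 1, 5): A returns 0, B raises IndexError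
import Mathlib
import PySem

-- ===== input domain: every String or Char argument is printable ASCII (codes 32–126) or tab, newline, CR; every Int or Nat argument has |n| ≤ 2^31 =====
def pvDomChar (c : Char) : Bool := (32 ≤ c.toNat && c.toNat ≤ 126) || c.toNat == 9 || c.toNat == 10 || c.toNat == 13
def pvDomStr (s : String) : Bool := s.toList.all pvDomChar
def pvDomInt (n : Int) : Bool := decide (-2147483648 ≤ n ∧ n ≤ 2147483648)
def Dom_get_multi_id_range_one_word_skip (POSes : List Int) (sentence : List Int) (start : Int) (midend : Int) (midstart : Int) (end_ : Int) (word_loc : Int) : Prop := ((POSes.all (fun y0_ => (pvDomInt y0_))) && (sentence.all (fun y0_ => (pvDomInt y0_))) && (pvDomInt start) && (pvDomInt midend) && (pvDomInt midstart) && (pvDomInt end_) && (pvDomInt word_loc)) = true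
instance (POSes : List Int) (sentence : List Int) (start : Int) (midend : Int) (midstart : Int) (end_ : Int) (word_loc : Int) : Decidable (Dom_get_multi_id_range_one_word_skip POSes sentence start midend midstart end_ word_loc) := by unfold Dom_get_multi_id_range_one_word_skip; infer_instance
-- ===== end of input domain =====

-- ===== PORT A =====
-- A packs MSB-first, walking the index ranges downwards and shifting the accumulator;
-- B validates first, lists the fields LSB-first and merges them by divide-and-conquer (objective: alternative).
-- loop body of A (used for both 'for i in range(..., -1)' loops): early 'return 0' is modelled as 'none'
def aLoop (POSes : List Int) (sentence : List Int) (word_loc : Int) (acc : Int) : List Int → Option Int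
  | [] => some acc
  | i :: t =>
    if PySem.List.pyGetD POSes i 0 == -2 then none
    else if i == word_loc then
      aLoop POSes sentence word_loc (Int.lor (acc <<< (18:Int)) (PySem.List.pyGetD sentence i 0)) t
    else
      aLoop POSes sentence word_loc (Int.lor (acc <<< (18:Int)) (PySem.List.pyGetD POSes i 0)) t

-- indexing uses the total pyGetD (default 0): Pre_ guarantees every accessed index is in range
def get_multi_id_range_one_word_skip (POSes : List Int) (sentence : List Int) (start : Int) (midend : Int) (midstart : Int) (end_ : Int) (word_loc : Int) : Int :=
  match aLoop POSes sentence word_loc 0 (PySem.List.pyRange (end_ - 1) (midstart - 1) (-1)) with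
  | none => 0
  | some f1 =>
    match aLoop POSes sentence word_loc f1 (PySem.List.pyRange (midend - 1) (start - 1) (-1)) with
    | none => 0
    | some f2 => Int.lor (f2 <<< (18:Int)) (midend - start - 1)

-- ===== PORT B =====
-- 'sentence[i] if i == word_loc else POSes[i]' of Source B's comprehensions
def bVal (POSes : List Int) (sentence : List Int) (word_loc : Int) (i : Int) : Int :=
  if i == word_loc then PySem.List.pyGetD sentence i 0 else PySem.List.pyGetD POSes i 0

-- Source B's _pack: divide-and-conquer merge of an LSB-first field list.
-- vals[:m] / vals[m:] with 0 ≤ m ≤ len are exactly List.take / List.drop.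
-- Source B never calls _pack on []; the [] branch only makes the Lean function total.
def bPack : List Int → Int
  | [] => 0
  | [x] => x
  | x :: y :: t =>
    let m := (x :: y :: t).length / 2
    Int.lor ((bPack ((x :: y :: t).drop m)) <<< ((18 * m : Nat):Int)) (bPack ((x :: y :: t).take m))
termination_by l => l.length
decreasing_by all_goals simp; omega

def get_multi_id_range_one_word_skip_alt (POSes : List Int) (sentence : List Int) (start : Int) (midend : Int) (midstart : Int) (end_ : Int) (word_loc : Int) : Int :=
  if (PySem.List.pyRange midstart end_ 1).any (fun i => PySem.List.pyGetD POSes i 0 == -2)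
     || (PySem.List.pyRange start midend 1).any (fun i => PySem.List.pyGetD POSes i 0 == -2) then 0
  else
    bPack ((midend - start - 1)
      :: ((PySem.List.pyRange start midend 1).map (bVal POSes sentence word_loc)
          ++ (PySem.List.pyRange midstart end_ 1).map (bVal POSes sentence word_loc)))

-- ===== PRECONDITION & SPEC =====
-- Pre_ requires every scanned index to be a valid POSes index (and a valid sentence index when it
-- equals word_loc): outside it A raises IndexError on almost all inputs; it also excludes the rare
-- inputs where a -2 occurs before the first out-of-range index, on which A returns 0 early and B
-- returns 0 as well (see the cite in claim.json).
-- stated on the interval endpoints (the scanned indices are exactly the integers of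
-- [midstart, end_-1] and [start, midend-1]), so it is decided in O(1)
def Pre_get_multi_id_range_one_word_skip (POSes : List Int) (sentence : List Int) (start : Int) (midend : Int) (midstart : Int) (end_ : Int) (word_loc : Int) : Prop :=
  (midstart < end_ →
    -(POSes.length : Int) ≤ midstart ∧ end_ - 1 < (POSes.length : Int) ∧
    (midstart ≤ word_loc ∧ word_loc < end_ → PySem.Raise.InRange sentence.length word_loc)) ∧
  (start < midend →
    -(POSes.length : Int) ≤ start ∧ midend - 1 < (POSes.length : Int) ∧
    (start ≤ word_loc ∧ word_loc < midend → PySem.Raise.InRange sentence.length word_loc))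
instance (POSes : List Int) (sentence : List Int) (start : Int) (midend : Int) (midstart : Int) (end_ : Int) (word_loc : Int) : Decidable (Pre_get_multi_id_range_one_word_skip POSes sentence start midend midstart end_ word_loc) := by unfold Pre_get_multi_id_range_one_word_skip; infer_instance

def pvWitness_get_multi_id_range_one_word_skip : List Int × List Int × Int × Int × Int × Int × Int :=
  ([1, 2, 3], [7, 8, 9], 0, 2, 2, 3, 1)

def Spec_get_multi_id_range_one_word_skip (POSes : List Int) (sentence : List Int) (start : Int) (midend : Int) (midstart : Int) (end_ : Int) (word_loc : Int) (out : Int) : Prop := out = get_multi_id_range_one_word_skip_alt POSes sentence start midend midstart end_ word_loc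
instance (POSes : List Int) (sentence : List Int) (start : Int) (midend : Int) (midstart : Int) (end_ : Int) (word_loc : Int) (out : Int) : Decidable (Spec_get_multi_id_range_one_word_skip POSes sentence start midend midstart end_ word_loc out) := by unfold Spec_get_multi_id_range_one_word_skip; infer_instance

-- ===== CLAIM (what is proved, stated in full; the proofs are below) =====
def Claim_equal_get_multi_id_range_one_word_skip : Prop := ∀ (POSes : List Int) (sentence : List Int) (start : Int) (midend : Int) (midstart : Int) (end_ : Int) (word_loc : Int), Dom_get_multi_id_range_one_word_skip POSes sentence start midend midstart end_ word_loc → Pre_get_multi_id_range_one_word_skip POSes sentence start midend midstart end_ word_loc → Spec_get_multi_id_range_one_word_skip POSes sentence start midend midstart end_ word_loc (get_multi_id_range_one_word_skip POSes sentence start midend midstart end_ word_loc)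

-- ===== LEMMAS AND PROOFS =====

-- two's-complement extensionality for Int
theorem int_ext {a b : Int} (h : ∀ i, a.testBit i = b.testBit i) : a = b := by
  cases a with
  | ofNat m =>
    cases b with
    | ofNat n =>
      have : m = n := Nat.eq_of_testBit_eq (fun i => h i)
      simp [this]
    | negSucc n =>
      have h2 := h (m + n)
      have hm : Nat.testBit m (m + n) = false :=
        Nat.testBit_eq_false_of_lt (lt_of_lt_of_le Nat.lt_two_pow_self (Nat.pow_le_pow_right (by norm_num) (Nat.le_add_right _ _)))
      have hn : Nat.testBit n (m + n) = false :=
        Nat.testBit_eq_false_of_lt (lt_of_lt_of_le Nat.lt_two_pow_self (Nat.pow_le_pow_right (by norm_num) (Nat.le_add_left _ _)))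
      simp only [show Int.testBit (Int.ofNat m) (m+n) = Nat.testBit m (m+n) from rfl,
        show Int.testBit (Int.negSucc n) (m+n) = !(Nat.testBit n (m+n)) from rfl, hm, hn] at h2
      simp at h2
  | negSucc m =>
    cases b with
    | ofNat n =>
      have h2 := h (m + n)
      have hm : Nat.testBit m (m + n) = false :=
        Nat.testBit_eq_false_of_lt (lt_of_lt_of_le Nat.lt_two_pow_self (Nat.pow_le_pow_right (by norm_num) (Nat.le_add_right _ _)))
      have hn : Nat.testBit n (m + n) = false :=
        Nat.testBit_eq_false_of_lt (lt_of_lt_of_le Nat.lt_two_pow_self (Nat.pow_le_pow_right (by norm_num) (Nat.le_add_left _ _)))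
      simp only [show Int.testBit (Int.negSucc m) (m+n) = !(Nat.testBit m (m+n)) from rfl,
        show Int.testBit (Int.ofNat n) (m+n) = Nat.testBit n (m+n) from rfl, hm, hn] at h2
      simp at h2
    | negSucc n =>
      have : m = n := Nat.eq_of_testBit_eq (fun i => by
        have h2 := h i
        simp only [show Int.testBit (Int.negSucc m) i = !(Nat.testBit m i) from rfl,
          show Int.testBit (Int.negSucc n) i = !(Nat.testBit n i) from rfl] at h2
        simpa using h2)
      simp [this]

theorem lor_comm' (a b : Int) : a.lor b = b.lor a :=
  int_ext (fun i => by simp [Int.testBit_lor, Bool.or_comm])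
theorem lor_assoc' (a b c : Int) : (a.lor b).lor c = a.lor (b.lor c) :=
  int_ext (fun i => by simp [Int.testBit_lor, Bool.or_assoc])
theorem zero_lor' (a : Int) : Int.lor 0 a = a :=
  int_ext (fun i => by
    simp [Int.testBit_lor, show Int.testBit 0 i = Nat.testBit 0 i from rfl])
theorem lor_two_mul (a b : Int) : (2*a).lor (2*b) = 2 * a.lor b := by
  have := Int.lor_bit false a false b
  simpa [Int.bit] using this
theorem shiftLeft_one' (a : Int) : a <<< (1:Int) = 2 * a := by
  simpa [mul_comm] using Int.shiftLeft_eq_mul_pow a 1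
-- shifting distributes over OR
theorem shiftLeft_lor (a b : Int) (n : Nat) : (a.lor b) <<< (n:Int) = (a <<< (n:Int)).lor (b <<< (n:Int)) := by
  induction n with
  | zero =>
    have e0 : ∀ x : Int, x <<< ((0:Nat):Int) = x := fun x => by simpa using Int.shiftLeft_eq_mul_pow x 0
    rw [e0, e0, e0]
  | succ k ih =>
    have e : ∀ x : Int, x <<< ((k+1 : Nat):Int) = (x <<< (k:Int)) <<< (1:Int) := by
      intro x
      have := Int.shiftLeft_add' x k 1
      simpa using this
    rw [e, e, e, ih, shiftLeft_one', shiftLeft_one', shiftLeft_one', lor_two_mul]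
theorem shiftLeft_shiftLeft' (a : Int) (m n : Nat) : (a <<< (m:Int)) <<< (n:Int) = a <<< ((m+n : Nat):Int) := by
  have h := Int.shiftLeft_add' a m (n:Int)
  rw [show ((m:Int) + (n:Int)) = (((m+n:Nat)):Int) by push_cast; ring] at h
  exact h.symm

-- A's fold over a value list (MSB-first), abstracted
def packF (a : Int) (V : List Int) : Int :=
  V.foldl (fun acc v => Int.lor (acc <<< (18:Int)) v) a

-- the same packing seen LSB-first
def packL : List Int → Int
  | [] => 0
  | x :: t => Int.lor ((packL t) <<< (18:Int)) x

theorem lor_zero' (a : Int) : a.lor 0 = a := by rw [lor_comm', zero_lor']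
theorem shiftLeft_zero' (a : Int) : a <<< (0:Int) = a := by
  simpa using Int.shiftLeft_eq_mul_pow a 0
theorem e18 : (18:Int) = ((18:Nat):Int) := rfl

-- A's loop is the guarded packF over the selected values
theorem aLoop_eq (POSes : List Int) (sentence : List Int) (word_loc : Int) (l : List Int) (acc : Int) :
    aLoop POSes sentence word_loc acc l =
      if l.any (fun i => PySem.List.pyGetD POSes i 0 == -2) then none
      else some (packF acc (l.map (bVal POSes sentence word_loc))) := by
  induction l generalizing acc with
  | nil => simp [aLoop, packF]
  | cons i t ih =>
    by_cases h : PySem.List.pyGetD POSes i 0 == -2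
    · simp [aLoop, h]
    · by_cases hw : i = word_loc
      · subst hw; simp [aLoop, h, ih, bVal, packF]
      · simp [aLoop, h, hw, ih, bVal, packF]

-- packL is packF read from the other end
theorem packL_eq_packF (l : List Int) : packL l = packF 0 l.reverse := by
  induction l with
  | nil => simp [packL, packF]
  | cons x t ih =>
    have : packF 0 (t.reverse ++ [x]) = Int.lor ((packF 0 t.reverse) <<< (18:Int)) x := by
      simp [packF, List.foldl_append]
    simp [packL, ih, List.reverse_cons, this]

-- splitting an LSB-first list: the high part is shifted past the low part
theorem packL_append (low high : List Int) :
    packL (low ++ high) = Int.lor ((packL high) <<< ((18 * low.length : Nat):Int)) (packL low) := by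
  induction low with
  | nil => simp [packL]; rw [shiftLeft_zero', lor_zero']
  | cons x low' ih =>
    have hlen : 18 * low'.length + 18 = 18 * (x :: low').length := by simp [List.length_cons]; omega
    simp only [List.cons_append, packL, ih]
    rw [e18, shiftLeft_lor, shiftLeft_shiftLeft', hlen, lor_assoc']

-- the divide-and-conquer merge computes packL on every nonempty list
theorem bPack_eq_packL (l : List Int) (h : l ≠ []) : bPack l = packL l := by
  induction hn : l.length using Nat.strong_induction_on generalizing l with
  | _ n ih =>
    match l, h with
    | [x], _ => simp [bPack, packL, zero_lor']
    | x :: y :: t, _ =>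
      subst hn
      rw [bPack]
      have hlen : (x :: y :: t).length = t.length + 2 := by simp
      set L := x :: y :: t with hL
      set m := L.length / 2 with hm
      have hm1 : 1 ≤ m := by rw [hm, hlen]; omega
      have hmlt : m < L.length := by rw [hm]; omega
      have hdrop : (L.drop m).length = L.length - m := by simp
      have htake : (L.take m).length = m := by simp [List.length_take]; omega
      have hdne : L.drop m ≠ [] := by
        intro hc; rw [← List.length_eq_zero_iff] at hc; omega
      have htne : L.take m ≠ [] := by
        intro hc; rw [← List.length_eq_zero_iff] at hc; omega
      rw [ih (L.drop m).length (by omega) _ hdne rfl,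
          ih (L.take m).length (by omega) _ htne rfl]
      conv_rhs => rw [← List.take_append_drop m L]
      rw [packL_append, htake]

theorem pvWitness_ok : Pre_get_multi_id_range_one_word_skip (pvWitness_get_multi_id_range_one_word_skip.1) (pvWitness_get_multi_id_range_one_word_skip.2.1) (pvWitness_get_multi_id_range_one_word_skip.2.2.1) (pvWitness_get_multi_id_range_one_word_skip.2.2.2.1) (pvWitness_get_multi_id_range_one_word_skip.2.2.2.2.1) (pvWitness_get_multi_id_range_one_word_skip.2.2.2.2.2.1) (pvWitness_get_multi_id_range_one_word_skip.2.2.2.2.2.2) := by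
  decide

-- ===== VERDICT (by name: the statement is the Claim_ definition above) =====
theorem get_multi_id_range_one_word_skip_spec : Claim_equal_get_multi_id_range_one_word_skip := by
  intro POSes sentence start midend midstart end_ word_loc _ _
  unfold Spec_get_multi_id_range_one_word_skip
  unfold get_multi_id_range_one_word_skip get_multi_id_range_one_word_skip_alt
  have hrev1 : PySem.List.pyRange (end_ - 1) (midstart - 1) (-1) = (PySem.List.pyRange midstart end_ 1).reverse := by
    rw [PySem.List.pyRange_neg_one_eq_reverse]; norm_num
  have hrev2 : PySem.List.pyRange (midend - 1) (start - 1) (-1) = (PySem.List.pyRange start midend 1).reverse := by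
    rw [PySem.List.pyRange_neg_one_eq_reverse]; norm_num
  rw [hrev1, hrev2]
  set R1 := PySem.List.pyRange midstart end_ 1
  set R2 := PySem.List.pyRange start midend 1
  cases h1 : R1.any (fun i => PySem.List.pyGetD POSes i 0 == -2) with
  | true => simp [aLoop_eq, h1]
  | false =>
    cases h2 : R2.any (fun i => PySem.List.pyGetD POSes i 0 == -2) with
    | true => simp [aLoop_eq, h1, h2]
    | false =>
      simp only [aLoop_eq, List.any_reverse, h1, h2, Bool.false_eq_true, if_false,
        Bool.or_self, List.map_reverse]
      -- A: fold the two MSB-first value lists, shift once more, OR in the count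
      -- B: divide-and-conquer over the LSB-first list = packL = packF of its reverse
      rw [bPack_eq_packL _ (by simp), packL_eq_packF]
      simp [packF, List.foldl_append, List.reverse_append]
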